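-- pv_equiv track=rewrite | github.com/bleriotusa/AlgorithmPractice | ElementsProgrammingInterviews/EpiMain.py | football_combos_nodpe
-- ===== SOURCE A (Python) =====
-- def football_combos_nodpe(score):
--     def twos(score):
--         return 1 if score % 2 == 0 else 0
--
--     def threes(score):
--         combos = 0
--         while score > 0:
--             if score % 3 == 0:
--                 combos += 1
--             score -= 2
--         return combos
--
--     sevens = 0
--     curr_score = score
--     while curr_score >= 7:
--         curr_score -= 7
--         sevens += twos(score) + threes(score)
--
--     return twos(score) + threes(score) + sevens
-- ===== SOURCE B (Python) =====
-- def football_combos_nodpe(score):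
--     t = 1 if score % 2 == 0 else 0
--     if score > 0:
--         m = (score - 1) // 2
--         r = (2 * score) % 3
--         th = (m - r) // 3 + 1 if m >= r else 0
--     else:
--         th = 0
--     k = score // 7 if score >= 7 else 0
--     return (t + th) * (1 + k)
-- ===== Notes on version B (the rewrite author's own statement) =====
-- stated objective: faster
-- what changed: Replaced the two counting loops (the step-by-2 divisibility-by-3 scan and the subtract-7 accumulation loop) by closed-form arithmetic: a formula counting multiples of 3 in the arithmetic progression plus score // 7 for the repetition factor.
import Mathlib
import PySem

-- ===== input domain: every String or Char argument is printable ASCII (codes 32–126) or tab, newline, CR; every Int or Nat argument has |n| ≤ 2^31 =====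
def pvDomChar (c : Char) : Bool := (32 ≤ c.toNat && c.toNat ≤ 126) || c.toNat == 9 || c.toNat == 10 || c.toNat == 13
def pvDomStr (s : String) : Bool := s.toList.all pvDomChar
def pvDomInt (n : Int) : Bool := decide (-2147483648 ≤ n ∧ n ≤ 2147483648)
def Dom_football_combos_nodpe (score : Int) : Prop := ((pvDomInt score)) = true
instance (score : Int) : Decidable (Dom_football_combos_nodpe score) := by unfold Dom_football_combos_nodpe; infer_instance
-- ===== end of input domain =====

-- B replaces both O(score) loops by closed-form arithmetic (divisibility count in an
-- arithmetic progression, and score // 7), an O(1) computation.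

-- ===== PORT A =====
def pvTwosA (score : Int) : Int := if PySem.Int.mod score 2 = 0 then 1 else 0

def pvThreesLoopA (score combos : Int) : Int :=
  if score > 0 then
    pvThreesLoopA (score - 2) (if PySem.Int.mod score 3 = 0 then combos + 1 else combos)
  else combos
termination_by score.toNat
decreasing_by omega

def pvThreesA (score : Int) : Int := pvThreesLoopA score 0

def pvSevensLoopA (curr_score score sevens : Int) : Int :=
  if curr_score ≥ 7 then
    pvSevensLoopA (curr_score - 7) score (sevens + (pvTwosA score + pvThreesA score))
  else sevens
termination_by curr_score.toNat
decreasing_by omega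

def football_combos_nodpe (score : Int) : Int :=
  pvTwosA score + pvThreesA score + pvSevensLoopA score score 0

-- ===== PORT B =====
def football_combos_nodpe_alt (score : Int) : Int :=
  let t : Int := if PySem.Int.mod score 2 = 0 then 1 else 0
  let th : Int :=
    if score > 0 then
      let m := PySem.Int.floordiv (score - 1) 2
      let r := PySem.Int.mod (2 * score) 3
      if m ≥ r then PySem.Int.floordiv (m - r) 3 + 1 else 0
    else 0
  let k : Int := if score ≥ 7 then PySem.Int.floordiv score 7 else 0
  (t + th) * (1 + k)

-- ===== PRECONDITION & SPEC =====
def Spec_football_combos_nodpe (score : Int) (out : Int) : Prop := out = football_combos_nodpe_alt score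
instance (score : Int) (out : Int) : Decidable (Spec_football_combos_nodpe score out) := by unfold Spec_football_combos_nodpe; infer_instance

-- ===== CLAIM (what is proved, stated in full; the proofs are below) =====
def Claim_equal_football_combos_nodpe : Prop := ∀ (score : Int), Dom_football_combos_nodpe score → Spec_football_combos_nodpe score (football_combos_nodpe score)

-- ===== LEMMAS AND PROOFS =====

-- closed form of A's `threes` loop (B's `th` expression)
def pvThB (s : Int) : Int :=
  if s > 0 then
    if (s - 1) / 2 ≥ (2 * s) % 3 then ((s - 1) / 2 - (2 * s) % 3) / 3 + 1 else 0
  else 0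

-- closed form of the number of iterations of A's `sevens` loop (B's `k`)
def pvKB (s : Int) : Int := if s ≥ 7 then s / 7 else 0

theorem pvThB_rec (s : Int) (hs : 0 < s) :
    pvThB s = (if s % 3 = 0 then 1 else 0) + pvThB (s - 2) := by
  unfold pvThB
  obtain ⟨t, ht⟩ : ∃ t, s = 6 * t + s % 6 := ⟨s / 6, by omega⟩
  have h6 : s % 6 = 0 ∨ s % 6 = 1 ∨ s % 6 = 2 ∨ s % 6 = 3 ∨ s % 6 = 4 ∨ s % 6 = 5 := by omega
  rcases h6 with h|h|h|h|h|h <;> rw [h] at ht <;> subst ht <;> split_ifs <;> omega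

theorem threesLoopA_eq (s c : Int) : pvThreesLoopA s c = c + pvThB s := by
  rw [pvThreesLoopA]
  split_ifs with h h2
  · rw [threesLoopA_eq (s - 2), pvThB_rec s h,
      PySem.Int.mod_eq_emod_of_pos (by norm_num)] at *
    simp [h2]; ring
  · rw [threesLoopA_eq (s - 2), pvThB_rec s h,
      PySem.Int.mod_eq_emod_of_pos (by norm_num)] at *
    simp [h2]
  · unfold pvThB
    simp [h]
termination_by s.toNat
decreasing_by all_goals omega

theorem pvKB_rec (c : Int) (hc : 7 ≤ c) : pvKB c = 1 + pvKB (c - 7) := by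
  unfold pvKB
  split_ifs <;> omega

theorem sevensLoopA_eq (c s acc : Int) :
    pvSevensLoopA c s acc = acc + (pvTwosA s + pvThreesA s) * pvKB c := by
  rw [pvSevensLoopA]
  split_ifs with h
  · rw [sevensLoopA_eq (c - 7), pvKB_rec c h]; ring
  · unfold pvKB
    simp [h]
termination_by c.toNat
decreasing_by omega

-- ===== VERDICT (by name: the statement is the Claim_ definition above) =====
theorem football_combos_nodpe_spec : Claim_equal_football_combos_nodpe := by
  intro score _
  unfold Spec_football_combos_nodpe football_combos_nodpe football_combos_nodpe_alt
  rw [sevensLoopA_eq]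
  unfold pvThreesA
  rw [threesLoopA_eq]
  simp only [PySem.Int.mod_eq_emod_of_pos (by norm_num : (0:Int) < 3),
    PySem.Int.floordiv_eq_ediv_of_pos (by norm_num : (0:Int) < 2),
    PySem.Int.floordiv_eq_ediv_of_pos (by norm_num : (0:Int) < 3),
    PySem.Int.floordiv_eq_ediv_of_pos (by norm_num : (0:Int) < 7)]
  unfold pvThB pvKB pvTwosA
  ring
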